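-- pv_equiv track=rewrite | github.com/InnovatorBrain/CALICO-Fall-24 | 6-main.py | check_wordd
-- ===== SOURCE A (Python) =====
-- def check_wordd(word):
--     consonants = "mnpstkwjl"
--     vowels = "aeiou"
--
--     illegal_sequences = ["wu", "wo", "ji", "ti", "nn", "nm"]
--
--     for i in range(len(word) - 1):
--         if word[i] in vowels and word[i + 1] in vowels:
--             return "ike"
--
--     for seq in illegal_sequences:
--         if seq in word:
--             return "ike"
--
--     i = 0
--     while i < len(word):
--         if word[i] in consonants:
--             i += 1
--         if i < len(word) and word[i] in vowels:
--             i += 1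
--         else:
--             return "ike"
--
--         if i < len(word) and word[i] == "n":
--             i += 1
--
--     return "pona"
-- ===== SOURCE B (Python) =====
-- def check_wordd(word):
--     consonants = "mnpstkwjl"
--     vowels = "aeiou"
--     illegal_pairs = [("w", "u"), ("w", "o"), ("j", "i"), ("t", "i"), ("n", "n"), ("n", "m")]
--
--     def allowed(a, b):
--         # is the adjacent pair a,b legal?
--         if b not in consonants and b not in vowels:
--             return False
--         if a in vowels:
--             return b in consonants
--         if a in consonants:
--             if b in vowels:
--                 return (a, b) not in illegal_pairs
--             return a == "n" and b != "n" and b != "m"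
--         return False
--
--     if word == "":
--         return "pona"
--     if word[0] not in consonants and word[0] not in vowels:
--         return "ike"
--     if word[-1] not in vowels and word[-1] != "n":
--         return "ike"
--     # a leading 'n' must be a syllable onset, i.e. followed by a vowel
--     if word[0] == "n" and (len(word) == 1 or word[1] in consonants):
--         return "ike"
--     for x, y in zip(word, word[1:]):
--         if not allowed(x, y):
--             return "ike"
--     return "pona"
-- ===== Notes on version B (the rewrite author's own statement) =====
-- stated objective: alternative
-- what changed: Replaces A's three passes (adjacent-vowel scan, six substring searches, greedy syllable state machine) by a single local characterization: one scan over adjacent character pairs plus first/last-character conditions.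
import Mathlib
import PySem

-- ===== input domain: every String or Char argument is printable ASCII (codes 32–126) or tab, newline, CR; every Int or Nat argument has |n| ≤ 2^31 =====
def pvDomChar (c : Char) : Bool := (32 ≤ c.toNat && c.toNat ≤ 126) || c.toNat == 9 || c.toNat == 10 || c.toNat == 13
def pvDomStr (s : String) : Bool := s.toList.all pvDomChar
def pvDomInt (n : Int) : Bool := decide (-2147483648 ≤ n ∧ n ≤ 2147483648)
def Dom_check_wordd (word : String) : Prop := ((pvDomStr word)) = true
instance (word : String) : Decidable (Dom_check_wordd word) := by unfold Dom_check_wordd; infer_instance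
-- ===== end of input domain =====

-- B replaces A's three passes (adjacent-vowel scan, substring searches, greedy
-- syllable state machine) by a single scan over adjacent character pairs plus
-- first/last-character conditions; same cost, different algorithm.


-- ===== PORT A =====
-- the while loop of A, on index i (word[i] via pyGetD, always guarded in range)
def checkLoopA (cs cons vow : List Char) (i : Nat) : String :=
  if _h : i < cs.length then
    let i1 := if cons.contains (PySem.List.pyGetD cs (i : Int) ' ') then i + 1 else i
    if i1 < cs.length && vow.contains (PySem.List.pyGetD cs (i1 : Int) ' ') then
      let i2 := i1 + 1
      if i2 < cs.length && (PySem.List.pyGetD cs (i2 : Int) ' ' == 'n') then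
        checkLoopA cs cons vow (i2 + 1)
      else
        checkLoopA cs cons vow i2
    else "ike"
  else "pona"
termination_by cs.length - i
decreasing_by all_goals (split <;> omega)


def check_wordd (word : String) : String :=
  let cs := word.toList
  let consonants := "mnpstkwjl".toList
  let vowels := "aeiou".toList
  -- for i in range(len(word)-1): adjacent vowels
  if (PySem.List.pyRange 0 ((cs.length : Int) - 1) 1).any (fun i =>
        vowels.contains (PySem.List.pyGetD cs i ' ') &&
        vowels.contains (PySem.List.pyGetD cs (i + 1) ' ')) then "ike"
  -- for seq in illegal_sequences: seq in word
  else if (["wu", "wo", "ji", "ti", "nn", "nm"] : List String).any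
            (fun seq => PySem.Str.isIn seq word) then "ike"
  else checkLoopA cs consonants vowels 0

-- ===== PORT B =====
def pvAllowedPair (cons vow : List Char) (ill : List (Char × Char)) (a b : Char) : Bool :=
  if !cons.contains b && !vow.contains b then false
  else if vow.contains a then cons.contains b
  else if cons.contains a then
    (if vow.contains b then !ill.contains (a, b)
     else a == 'n' && b != 'n' && b != 'm')
  else false

def check_wordd_alt (word : String) : String :=
  let cs := word.toList
  let consonants := "mnpstkwjl".toList
  let vowels := "aeiou".toList
  let illegal : List (Char × Char) := [('w','u'),('w','o'),('j','i'),('t','i'),('n','n'),('n','m')]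
  match cs with
  | [] => "pona"
  | c0 :: rest =>
    if !consonants.contains c0 && !vowels.contains c0 then "ike"
    else if !vowels.contains (PySem.List.pyGetD cs (-1) ' ') &&
            (PySem.List.pyGetD cs (-1) ' ' != 'n') then "ike"
    else if c0 == 'n' && (rest.length == 0 || consonants.contains (PySem.List.pyGetD cs (1 : Int) ' ')) then "ike"
    else if (cs.zip rest).all (fun p => pvAllowedPair consonants vowels illegal p.1 p.2) then "pona"
    else "ike"


-- ===== PRECONDITION & SPEC =====
def Spec_check_wordd (word : String) (out : String) : Prop := out = check_wordd_alt word
instance (word : String) (out : String) : Decidable (Spec_check_wordd word out) := by unfold Spec_check_wordd; infer_instance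

-- ===== CLAIM (what is proved, stated in full; the proofs are below) =====
def Claim_equal_check_wordd : Prop := ∀ (word : String), Dom_check_wordd word → Spec_check_wordd word (check_wordd word)

-- ===== LEMMAS AND PROOFS =====

-- proof-side character classes, A's machine, B's predicate
def isV (c : Char) : Bool := "aeiou".toList.contains c
def isC (c : Char) : Bool := "mnpstkwjl".toList.contains c
mutual
def mach : List Char → Bool
  | [] => true
  | c :: r =>
    if isC c then
      match r with
      | [] => false
      | v :: r1 => isV v && machC r1
    else if isV c then machC r
    else false
termination_by l => 2 * l.length
decreasing_by all_goals (simp; try omega)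
def machC : List Char → Bool
  | [] => mach []
  | c :: r => if c == 'n' then mach r else mach (c :: r)
termination_by l => 2 * l.length + 1
decreasing_by all_goals (simp; try omega)
end

def pvAt (cs : List Char) (i : Nat) : Char := cs.getD i ' '

theorem pyGetD_at (cs : List Char) (i : Nat) :
    PySem.List.pyGetD cs (i : Int) ' ' = pvAt cs i := by
  rw [PySem.List.pyGetD_natCast]; rfl

theorem drop_cons (cs : List Char) (i : Nat) (h : i < cs.length) :
    cs.drop i = pvAt cs i :: cs.drop (i + 1) := by
  rw [List.drop_eq_getElem_cons h]
  unfold pvAt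
  rw [List.getD_eq_getElem _ _ h]

theorem machC_cons (c : Char) (r : List Char) :
    machC (c :: r) = if c = 'n' then mach r else mach (c :: r) := by
  simp [machC]

theorem machC_drop (cs : List Char) (j : Nat)
    (hcond : ¬(j < cs.length ∧ pvAt cs j = 'n')) :
    machC (cs.drop j) = mach (cs.drop j) := by
  by_cases hj : j < cs.length
  · rw [drop_cons cs j hj, machC_cons]
    rw [if_neg (fun hn => hcond ⟨hj, hn⟩)]
  · rw [List.drop_eq_nil_iff.mpr (by omega)]
    simp [machC]

theorem mach_cons_cons (a v : Char) (r : List Char) (ha : isC a = true) :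
    mach (a :: v :: r) = (isV v && machC r) := by
  rw [mach]; simp [ha]

theorem mach_vowel (a : Char) (r : List Char) (hc : isC a = false) (hv : isV a = true) :
    mach (a :: r) = machC r := by
  rw [mach.eq_def]; simp [hc, hv]

theorem loopA_eq (cs : List Char) (i : Nat) :
    checkLoopA cs "mnpstkwjl".toList "aeiou".toList i
      = if mach (cs.drop i) then "pona" else "ike" := by
  rw [checkLoopA]
  by_cases h : i < cs.length
  · simp only [h, dite_true, pyGetD_at]
    rw [drop_cons cs i h]
    by_cases hc : isC (pvAt cs i) = true
    · -- consonant: i1 = i + 1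
      rw [show ("mnpstkwjl".toList.contains (pvAt cs i)) = true from hc]
      simp only [if_true]
      by_cases h1 : i + 1 < cs.length
      · rw [drop_cons cs (i+1) h1, mach_cons_cons _ _ _ hc]
        by_cases hv : isV (pvAt cs (i+1)) = true
        · rw [show ("aeiou".toList.contains (pvAt cs (i+1))) = true from hv]
          simp only [h1, decide_true, Bool.true_and, if_true, hv]
          by_cases h2 : (i + 1 + 1 < cs.length ∧ pvAt cs (i+1+1) = 'n')
          · obtain ⟨h2l, h2n⟩ := h2
            rw [if_pos (by simp [h2l, h2n])]
            rw [loopA_eq cs (i+1+1+1)]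
            rw [drop_cons cs (i+1+1) h2l, h2n, machC_cons]
            simp
          · rw [if_neg (by simpa using fun hl hn => h2 ⟨hl, hn⟩)]
            rw [loopA_eq cs (i+1+1)]
            rw [machC_drop cs (i+1+1) h2]
        · rw [Bool.not_eq_true] at hv
          rw [show ("aeiou".toList.contains (pvAt cs (i+1))) = isV (pvAt cs (i+1)) from rfl, hv]
          simp
      · have hd : cs.drop (i+1) = [] := List.drop_eq_nil_iff.mpr (by omega)
        rw [hd, if_neg (by simp; omega)]
        rw [show mach [pvAt cs i] = false by rw [mach]; simp [hc]]
        simp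
    · -- not a consonant: i1 = i
      rw [Bool.not_eq_true] at hc
      rw [show ("mnpstkwjl".toList.contains (pvAt cs i)) = isC (pvAt cs i) from rfl, hc]
      simp only [Bool.false_eq_true, if_false, h, decide_true, Bool.true_and]
      by_cases hv : isV (pvAt cs i) = true
      · rw [show ("aeiou".toList.contains (pvAt cs i)) = true from hv, if_pos rfl]
        rw [mach_vowel _ _ hc hv]
        by_cases h2 : (i + 1 < cs.length ∧ pvAt cs (i+1) = 'n')
        · obtain ⟨h2l, h2n⟩ := h2
          rw [if_pos (by simp [h2l, h2n])]
          rw [loopA_eq cs (i+1+1)]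
          rw [drop_cons cs (i+1) h2l, h2n, machC_cons]
          simp
        · rw [if_neg (by simpa using fun hl hn => h2 ⟨hl, hn⟩)]
          rw [loopA_eq cs (i+1)]
          rw [machC_drop cs (i+1) h2]
      · rw [Bool.not_eq_true] at hv
        rw [show ("aeiou".toList.contains (pvAt cs i)) = isV (pvAt cs i) from rfl, hv]
        rw [show mach (pvAt cs i :: cs.drop (i+1)) = false by rw [mach.eq_def]; simp [hc, hv]]
        simp
  · have hd : cs.drop i = [] := List.drop_eq_nil_iff.mpr (by omega)
    simp [h, hd, mach]
termination_by cs.length - i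
decreasing_by all_goals omega
def okP (a b : Char) : Bool :=
  pvAllowedPair "mnpstkwjl".toList "aeiou".toList
    [('w','u'),('w','o'),('j','i'),('t','i'),('n','n'),('n','m')] a b

def pairsOK : List Char → Bool
  | a :: b :: r => okP a b && pairsOK (b :: r)
  | _ => true

def lastOK : List Char → Bool
  | [] => false
  | [c] => isV c || c == 'n'
  | _ :: r => lastOK r

def nbad : List Char → Bool
  | [] => false
  | c0 :: rest => c0 == 'n' && (rest.length == 0 || isC (rest.getD 0 ' '))

def bgood : List Char → Bool
  | [] => true
  | c0 :: rest => (isC c0 || isV c0) && lastOK (c0 :: rest) && !nbad (c0 :: rest) && pairsOK (c0 :: rest)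

theorem zip_all_eq (cs : List Char) :
    (cs.zip cs.tail).all (fun p => okP p.1 p.2) = pairsOK cs := by
  match cs with
  | [] => rfl
  | [a] => rfl
  | a :: b :: r =>
    simp only [List.tail_cons, List.zip_cons_cons, List.all_cons, pairsOK]
    rw [← zip_all_eq (b :: r)]
    simp

theorem lastOK_eq (c0 : Char) (rest : List Char) :
    (!"aeiou".toList.contains (PySem.List.pyGetD (c0 :: rest) (-1) ' ') &&
       (PySem.List.pyGetD (c0 :: rest) (-1) ' ' != 'n')) = !lastOK (c0 :: rest) := by
  induction rest generalizing c0 with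
  | nil =>
    rw [PySem.List.pyGetD_neg_one _ _ (by simp)]
    show (!"aeiou".toList.contains c0 && (c0 != 'n')) = !(isV c0 || c0 == 'n')
    cases hv : isV c0
    · rw [show "aeiou".toList.contains c0 = isV c0 from rfl, hv]; simp [bne]
    · rw [show "aeiou".toList.contains c0 = isV c0 from rfl, hv]; simp
  | cons c1 r ih =>
    have hih := ih c1
    rw [PySem.List.pyGetD_neg_one _ _ (by simp)] at hih
    rw [PySem.List.pyGetD_neg_one _ _ (by simp), List.getLast_cons_cons]
    exact hih

theorem getD_one (c0 : Char) (rest : List Char) :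
    PySem.List.pyGetD (c0 :: rest) (1 : Int) ' ' = rest.getD 0 ' ' := by
  have h : ((1 : Nat) : Int) = (1 : Int) := by norm_num
  rw [← h, PySem.List.pyGetD_natCast]
  rfl

theorem alt_eq_bgood (word : String) :
    check_wordd_alt word = if bgood word.toList then "pona" else "ike" := by
  cases h : word.toList with
  | nil => simp only [check_wordd_alt, h, bgood]; rfl
  | cons c0 rest =>
    simp only [check_wordd_alt, h]
    rw [getD_one]
    have hz : (((c0 :: rest).zip rest).all fun p => pvAllowedPair "mnpstkwjl".toList "aeiou".toList
        [('w','u'),('w','o'),('j','i'),('t','i'),('n','n'),('n','m')] p.1 p.2) = pairsOK (c0 :: rest) :=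
      zip_all_eq (c0 :: rest)
    rw [hz]
    rw [lastOK_eq c0 rest]
    have h1 : (!"mnpstkwjl".toList.contains c0 && !"aeiou".toList.contains c0)
        = !(isC c0 || isV c0) := by
      simp [isC, isV]
    rw [h1]
    have hn : (c0 == 'n' && (rest.length == 0 || "mnpstkwjl".toList.contains (rest.getD 0 ' ')))
        = nbad (c0 :: rest) := rfl
    rw [hn]
    cases hP : (isC c0 || isV c0) <;> cases hL : lastOK (c0 :: rest) <;>
      cases hN : nbad (c0 :: rest) <;> cases hPR : pairsOK (c0 :: rest) <;>
      simp [bgood, hP, hL, hN, hPR]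

def illP (a b : Char) : Bool :=
  ([('w','u'),('w','o'),('j','i'),('t','i'),('n','n'),('n','m')] : List (Char × Char)).contains (a, b)

def adjVV (cs : List Char) : Bool := (cs.zip cs.tail).any (fun p => isV p.1 && isV p.2)
def adjIll (cs : List Char) : Bool := (cs.zip cs.tail).any (fun p => illP p.1 p.2)

theorem illP_or (a b : Char) :
    illP a b = ((a == 'w' && b == 'u') || ((a == 'w' && b == 'o') || ((a == 'j' && b == 'i') ||
                ((a == 't' && b == 'i') || ((a == 'n' && b == 'n') || (a == 'n' && b == 'm')))))) := by
  simp only [illP, List.contains_cons, List.contains_nil, Bool.or_false]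
  rfl

theorem pair_infix_zip (a b : Char) (cs : List Char) :
    ([a, b] <:+: cs) ↔ (a, b) ∈ cs.zip cs.tail := by
  match cs with
  | [] => simp
  | [x] => simp [List.infix_cons_iff]
  | x :: y :: r =>
    rw [List.infix_cons_iff]
    rw [pair_infix_zip a b (y :: r)]
    simp only [List.tail_cons, List.zip_cons_cons, List.mem_cons]
    constructor
    · rintro (hp | hp)
      · rw [List.cons_prefix_cons] at hp
        obtain ⟨hxa, hp2⟩ := hp
        rw [List.cons_prefix_cons] at hp2
        obtain ⟨hyb, _⟩ := hp2
        left; rw [hxa, hyb]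
      · right; exact hp
    · rintro (hp | hp)
      · left
        obtain ⟨h1, h2⟩ := Prod.mk.injEq .. ▸ hp
        rw [List.cons_prefix_cons]
        exact ⟨h1, by rw [List.cons_prefix_cons]; exact ⟨h2, List.nil_prefix⟩⟩
      · right; exact hp

theorem zip_any_iff (f : Char → Char → Bool) (cs : List Char) :
    (cs.zip cs.tail).any (fun p => f p.1 p.2) = true ↔
      ∃ i : Nat, i + 1 < cs.length ∧ f (cs.getD i ' ') (cs.getD (i+1) ' ') = true := by
  rw [List.any_eq_true]
  have hlen : (cs.zip cs.tail).length = cs.length - 1 := by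
    rw [List.length_zip, List.length_tail]; omega
  constructor
  · rintro ⟨p, hmem, hf⟩
    obtain ⟨i, hi, hget⟩ := List.mem_iff_getElem.mp hmem
    have hi1 : i + 1 < cs.length := by omega
    have hi0 : i < cs.length := by omega
    refine ⟨i, hi1, ?_⟩
    rw [List.getElem_zip] at hget
    rw [List.getElem_tail] at hget
    rw [List.getD_eq_getElem _ _ hi0, List.getD_eq_getElem _ _ hi1]
    rw [← hget] at hf
    simpa using hf
  · rintro ⟨i, hi1, hf⟩
    have hi0 : i < cs.length := by omega
    refine ⟨(cs.getD i ' ', cs.getD (i+1) ' '), ?_, hf⟩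
    apply List.mem_iff_getElem.mpr
    refine ⟨i, by omega, ?_⟩
    rw [List.getElem_zip, List.getElem_tail]
    rw [List.getD_eq_getElem _ _ hi0, List.getD_eq_getElem _ _ hi1]

theorem passIll_eq (word : String) :
    ((["wu", "wo", "ji", "ti", "nn", "nm"] : List String).any
      (fun seq => PySem.Str.isIn seq word)) = adjIll word.toList := by
  rw [Bool.eq_iff_iff]
  unfold adjIll
  constructor
  · intro h
    simp only [List.any_cons, List.any_nil, Bool.or_false, Bool.or_eq_true] at h
    apply List.any_eq_true.mpr
    rcases h with h | h | h | h | h | h <;>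
      rw [PySem.Str.isIn_iff_infix] at h
    · rw [show ("wu".toList) = ['w','u'] from rfl, pair_infix_zip] at h
      exact ⟨('w','u'), h, by decide⟩
    · rw [show ("wo".toList) = ['w','o'] from rfl, pair_infix_zip] at h
      exact ⟨('w','o'), h, by decide⟩
    · rw [show ("ji".toList) = ['j','i'] from rfl, pair_infix_zip] at h
      exact ⟨('j','i'), h, by decide⟩
    · rw [show ("ti".toList) = ['t','i'] from rfl, pair_infix_zip] at h
      exact ⟨('t','i'), h, by decide⟩
    · rw [show ("nn".toList) = ['n','n'] from rfl, pair_infix_zip] at h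
      exact ⟨('n','n'), h, by decide⟩
    · rw [show ("nm".toList) = ['n','m'] from rfl, pair_infix_zip] at h
      exact ⟨('n','m'), h, by decide⟩
  · intro h
    obtain ⟨p, hmem, hill⟩ := List.any_eq_true.mp h
    have hp : p ∈ ([('w','u'),('w','o'),('j','i'),('t','i'),('n','n'),('n','m')] : List (Char × Char)) := by
      have := List.contains_iff_mem.mp (show _ from hill)
      simpa using this
    simp only [List.any_cons, List.any_nil, Bool.or_false, Bool.or_eq_true]
    simp only [List.mem_cons, List.not_mem_nil, or_false] at hp
    rcases hp with hp | hp | hp | hp | hp | hp <;> subst hp <;>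
      rw [← pair_infix_zip] at hmem
    · exact Or.inl (by rw [PySem.Str.isIn_iff_infix]; exact hmem)
    · exact Or.inr (Or.inl (by rw [PySem.Str.isIn_iff_infix]; exact hmem))
    · exact Or.inr (Or.inr (Or.inl (by rw [PySem.Str.isIn_iff_infix]; exact hmem)))
    · exact Or.inr (Or.inr (Or.inr (Or.inl (by rw [PySem.Str.isIn_iff_infix]; exact hmem))))
    · exact Or.inr (Or.inr (Or.inr (Or.inr (Or.inl (by rw [PySem.Str.isIn_iff_infix]; exact hmem)))))
    · exact Or.inr (Or.inr (Or.inr (Or.inr (Or.inr (by rw [PySem.Str.isIn_iff_infix]; exact hmem)))))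

theorem pyGetD_int_nat (cs : List Char) (x : Int) (h0 : 0 ≤ x) (h1 : x < cs.length) :
    PySem.List.pyGetD cs x ' ' = cs.getD x.toNat ' ' := by
  rw [PySem.List.pyGetD_eq_getElem cs ' ' h0 (by exact_mod_cast h1)]
  rw [List.getD_eq_getElem _ _ (by omega)]

theorem passVV_eq (cs : List Char) :
    ((PySem.List.pyRange 0 ((cs.length : Int) - 1) 1).any (fun i =>
        "aeiou".toList.contains (PySem.List.pyGetD cs i ' ') &&
        "aeiou".toList.contains (PySem.List.pyGetD cs (i + 1) ' '))) = adjVV cs := by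
  rw [Bool.eq_iff_iff]
  unfold adjVV
  rw [zip_any_iff (fun a b => isV a && isV b) cs]
  rw [List.any_eq_true]
  constructor
  · rintro ⟨x, hx, hp⟩
    rw [PySem.List.mem_pyRange_one] at hx
    obtain ⟨hx0, hx1⟩ := hx
    refine ⟨x.toNat, by omega, ?_⟩
    rw [pyGetD_int_nat cs x hx0 (by omega), pyGetD_int_nat cs (x+1) (by omega) (by omega)] at hp
    rw [show (x+1).toNat = x.toNat + 1 by omega] at hp
    exact hp
  · rintro ⟨i, hi, hp⟩
    refine ⟨(i : Int), ?_, ?_⟩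
    · rw [PySem.List.mem_pyRange_one]
      constructor
      · omega
      · omega
    · show (_ && _) = true
      rw [show ((i : Int) + 1) = ((i + 1 : Nat) : Int) by push_cast; ring]
      rw [PySem.List.pyGetD_natCast, PySem.List.pyGetD_natCast]
      exact hp

theorem isV_cases {c : Char} (h : isV c = true) :
    c = 'a' ∨ c = 'e' ∨ c = 'i' ∨ c = 'o' ∨ c = 'u' := by
  simpa [isV] using h

theorem vnc {c : Char} (h : isV c = true) : isC c = false := by
  rcases isV_cases h with rfl | rfl | rfl | rfl | rfl <;> decide

theorem cnv {c : Char} (h : isC c = true) : isV c = false := by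
  cases hv : isV c
  · rfl
  · rw [vnc hv] at h; cases h

theorem v_ne_n {c : Char} (h : isV c = true) : (c == 'n') = false := by
  rcases isV_cases h with rfl | rfl | rfl | rfl | rfl <;> decide

theorem v_ne_m {c : Char} (h : isV c = true) : (c == 'm') = false := by
  rcases isV_cases h with rfl | rfl | rfl | rfl | rfl <;> decide

theorem v_notIll {a : Char} (h : isV a = true) (b : Char) : illP a b = false := by
  rcases isV_cases h with rfl | rfl | rfl | rfl | rfl <;>
    (rw [illP_or]; rfl)

theorem illP_n (e : Char) : illP 'n' e = ((e == 'n') || (e == 'm')) := by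
  rw [illP_or]
  simp

theorem okP_v {a : Char} (h : isV a = true) (b : Char) : okP a b = isC b := by
  simp only [okP, pvAllowedPair, show "aeiou".toList.contains a = isV a from rfl, h]
  show (if (!isC b && !isV b) = true then false else isC b) = isC b
  cases hc : isC b <;> cases hv : isV b <;> simp

theorem okP_cv {a b : Char} (hca : isC a = true) (hva : isV a = false) (hvb : isV b = true) :
    okP a b = !illP a b := by
  simp only [okP, pvAllowedPair,
    show "aeiou".toList.contains a = isV a from rfl,
    show "aeiou".toList.contains b = isV b from rfl,
    show "mnpstkwjl".toList.contains a = isC a from rfl,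
    show "mnpstkwjl".toList.contains b = isC b from rfl,
    hca, hva, hvb]
  show (if (!isC b && !true) = true then false else !illP a b) = !illP a b
  simp

theorem okP_cc {a b : Char} (hca : isC a = true) (hva : isV a = false) (hvb : isV b = false) :
    okP a b = (isC b && (a == 'n' && (b != 'n' && b != 'm'))) := by
  simp only [okP, pvAllowedPair,
    show "aeiou".toList.contains a = isV a from rfl,
    show "aeiou".toList.contains b = isV b from rfl,
    show "mnpstkwjl".toList.contains a = isC a from rfl,
    show "mnpstkwjl".toList.contains b = isC b from rfl,
    hca, hva, hvb]
  cases hc : isC b <;> simp [Bool.and_assoc]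

theorem adjVV_cons2 (a b : Char) (r : List Char) :
    adjVV (a :: b :: r) = ((isV a && isV b) || adjVV (b :: r)) := by
  simp [adjVV, List.tail_cons, List.zip_cons_cons, List.any_cons]

theorem adjIll_cons2 (a b : Char) (r : List Char) :
    adjIll (a :: b :: r) = (illP a b || adjIll (b :: r)) := by
  simp [adjIll, List.tail_cons, List.zip_cons_cons, List.any_cons]

theorem hVn : isV 'n' = false := by decide
theorem hCn : isC 'n' = true := by decide

theorem machC_eq (b : Char) (r : List Char) :
    machC (b :: r) = if b == 'n' then mach r else mach (b :: r) := by
  simp [machC]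

set_option maxHeartbeats 2000000 in
theorem main_eq : ∀ (cs : List Char), (!adjVV cs && !adjIll cs && mach cs) = bgood cs
  | [] => by simp [adjVV, adjIll, mach, bgood]
  | [c] => by
    by_cases hv : isV c = true
    · have hc := vnc hv
      have hn := v_ne_n hv
      rw [mach_vowel c [] hc hv]
      simp [adjVV, adjIll, bgood, pairsOK, lastOK, nbad, machC, mach, hv, hc, hn]
    · rw [Bool.not_eq_true] at hv
      by_cases hc : isC c = true
      · have hm : mach [c] = false := by rw [mach.eq_def]; simp [hc]
        cases hn : (c == 'n') <;>
          simp [adjVV, adjIll, bgood, pairsOK, lastOK, nbad, hv, hc, hn, hm]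
      · rw [Bool.not_eq_true] at hc
        have hm : mach [c] = false := by rw [mach.eq_def]; simp [hc, hv]
        simp [adjVV, adjIll, bgood, hv, hc, hm]
  | a :: b :: r => by
    rw [adjVV_cons2, adjIll_cons2]
    by_cases hva : isV a = true
    · have hca := vnc hva
      have hna := v_ne_n hva
      rw [mach_vowel a (b :: r) hca hva, machC_eq, v_notIll hva b]
      by_cases hb : b = 'n'
      · subst hb
        match r with
        | [] =>
          simp [adjVV, adjIll, mach, bgood, pairsOK, lastOK, nbad,
                hva, hca, hna, hVn, hCn, okP_v hva]
        | e :: t =>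
          rw [adjVV_cons2 'n' e t, adjIll_cons2 'n' e t, illP_n e]
          have hmain := main_eq (e :: t)
          simp only [bgood, pairsOK, lastOK, nbad] at hmain ⊢
          by_cases hve : isV e = true
          · have hce := vnc hve
            have hen := v_ne_n hve
            have hem := v_ne_m hve
            rw [okP_v hva, okP_cv hCn hVn hve, illP_n e]
            simp only [hva, hca, hna, hVn, hCn, hce, hen, hem]
            rw [Bool.eq_iff_iff] at hmain ⊢
            simp only [Bool.and_eq_true, Bool.or_eq_true, Bool.not_eq_true',
              Bool.and_eq_false_iff, Bool.or_eq_false_iff, beq_iff_eq, bne_iff_ne,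
              Bool.not_eq_true] at hmain ⊢
            tauto
          · rw [Bool.not_eq_true] at hve
            rw [okP_v hva, okP_cc hCn hVn hve]
            simp only [hva, hca, hna, hVn, hCn, hve]
            rw [Bool.eq_iff_iff] at hmain ⊢
            simp only [Bool.and_eq_true, Bool.or_eq_true, Bool.not_eq_true',
              Bool.and_eq_false_iff, Bool.or_eq_false_iff, beq_iff_eq, bne_iff_ne,
              beq_eq_false_iff_ne, if_true, Bool.not_eq_true] at hmain ⊢
            have hve2 : ¬ (isV e = true) := by simp [hve]
            tauto
      · -- a vowel, b ≠ 'n'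
        have hbn : (b == 'n') = false := by simp [hb]
        rw [hbn]
        have hmain := main_eq (b :: r)
        simp only [bgood, pairsOK, lastOK] at hmain ⊢
        rw [okP_v hva]
        have hnb1 : nbad (a :: b :: r) = false := by simp [nbad, hna]
        have hnb2 : nbad (b :: r) = false := by simp [nbad, hbn]
        rw [hnb1]
        rw [hnb2] at hmain
        simp only [hva, Bool.true_and, Bool.not_false, Bool.and_true, Bool.false_eq_true, if_false]
        have hx : isV b = false ↔ ¬ (isV b = true) := by simp
        have himp : isV b = true → isC b = false := fun h => vnc h
        have himp2 : isC b = true → isV b = false := fun h => cnv h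
        rw [Bool.eq_iff_iff] at hmain ⊢
        simp only [Bool.and_eq_true, Bool.or_eq_true, Bool.not_eq_true',
          Bool.and_eq_false_iff, Bool.or_eq_false_iff, beq_iff_eq, bne_iff_ne,
          beq_eq_false_iff_ne, if_true] at hmain ⊢
        tauto
    · rw [Bool.not_eq_true] at hva
      by_cases hca : isC a = true
      · rw [mach_cons_cons a b r hca]
        by_cases hvb : isV b = true
        · have hcb := vnc hvb
          have hbn := v_ne_n hvb
          rw [show machC r = mach (b :: r) from (mach_vowel b r hcb hvb).symm]
          have hmain := main_eq (b :: r)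
          simp only [bgood, pairsOK, lastOK] at hmain ⊢
          rw [okP_cv hca hva hvb]
          have hnb1 : nbad (a :: b :: r) = false := by simp [nbad, hcb]
          have hnb2 : nbad (b :: r) = false := by simp [nbad, hbn]
          rw [hnb1]
          rw [hnb2] at hmain
          simp only [hva, hvb, hcb, Bool.false_and, Bool.not_false, Bool.and_true,
            Bool.true_and, Bool.not_eq_true]
          rw [Bool.eq_iff_iff] at hmain ⊢
          simp only [Bool.and_eq_true, Bool.or_eq_true, Bool.not_eq_true',
            Bool.and_eq_false_iff, Bool.or_eq_false_iff, beq_iff_eq, bne_iff_ne,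
            beq_eq_false_iff_ne, if_true] at hmain ⊢
          tauto
        · rw [Bool.not_eq_true] at hvb
          simp only [bgood, pairsOK, lastOK] at *
          rw [okP_cc hca hva hvb]
          have hnb1 : nbad (a :: b :: r) = (a == 'n' && isC b) := by simp [nbad]
          rw [hnb1]
          simp only [hvb, Bool.false_and, Bool.and_false]
          rw [Bool.eq_iff_iff]
          simp only [Bool.and_eq_true, Bool.or_eq_true, Bool.not_eq_true',
            Bool.and_eq_false_iff, Bool.or_eq_false_iff, beq_iff_eq, bne_iff_ne,
            beq_eq_false_iff_ne, Bool.false_eq_true]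
          have hx : isC b = false ↔ ¬ (isC b = true) := by simp
          tauto
      · rw [Bool.not_eq_true] at hca
        have hm : mach (a :: b :: r) = false := by rw [mach.eq_def]; simp [hca, hva]
        rw [hm]
        simp [bgood, hca, hva]

-- ===== VERDICT (by name: the statement is the Claim_ definition above) =====
theorem check_wordd_spec : Claim_equal_check_wordd := by
  intro word _
  unfold Spec_check_wordd
  rw [alt_eq_bgood, ← main_eq]
  unfold check_wordd
  simp only [passVV_eq, passIll_eq, loopA_eq, List.drop_zero]
  cases h1 : adjVV word.toList <;> cases h2 : adjIll word.toList <;> simp
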